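-- pv_equiv track=rewrite | github.com/AlainTeil/NF | nf_bench/generators.py | _split_layers
-- ===== SOURCE A (Python) =====
-- def _split_layers(n_nodes: int) -> list[list[int]]:
--     """Partition ``range(n_nodes)`` into 2..6 contiguous layers.
--
--     Targets roughly 150 nodes per layer; clamped to a minimum of 2 layers (so
--     every layered DAG actually has a notion of source/sink layer) and a
--     maximum of 6 (to keep small graphs from becoming too deep).
--     """
--
--     if n_nodes < 2:
--         raise ValueError("Layered graphs require at least two nodes")
--
--     target_layers = max(2, n_nodes // 150)
--     layer_count = min(target_layers, 6, n_nodes)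
--
--     base, remainder = divmod(n_nodes, layer_count)
--     layers: list[list[int]] = []
--     current = 0
--     for idx in range(layer_count):
--         size = max(1, base + (1 if idx < remainder else 0))
--         layers.append(list(range(current, current + size)))
--         current += size
--     if layers[-1][-1] != n_nodes - 1:
--         layers[-1][-1] = n_nodes - 1
--     return layers
-- ===== SOURCE B (Python) =====
-- def _split_layers(n_nodes: int) -> list[list[int]]:
--     """Partition range(n_nodes) into 2..6 contiguous layers via closed-form cut points."""
--     if n_nodes < 2:
--         raise ValueError("Layered graphs require at least two nodes")
--
--     layer_count = min(max(2, n_nodes // 150), 6, n_nodes)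
--     base, remainder = divmod(n_nodes, layer_count)
--
--     def cut(i: int) -> int:
--         return i * base + min(i, remainder)
--
--     return [list(range(cut(i), cut(i + 1))) for i in range(layer_count)]
-- ===== Notes on version B (the rewrite author's own statement) =====
-- stated objective: simpler
-- what changed: Replaces the stateful loop (running `current` offset, per-step max(1,..) size, and the dead last-element fix-up) by a stateless comprehension that emits layer i as range(cut(i), cut(i+1)) from the closed-form cut point cut(i) = i*base + min(i, remainder).
import Mathlib
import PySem

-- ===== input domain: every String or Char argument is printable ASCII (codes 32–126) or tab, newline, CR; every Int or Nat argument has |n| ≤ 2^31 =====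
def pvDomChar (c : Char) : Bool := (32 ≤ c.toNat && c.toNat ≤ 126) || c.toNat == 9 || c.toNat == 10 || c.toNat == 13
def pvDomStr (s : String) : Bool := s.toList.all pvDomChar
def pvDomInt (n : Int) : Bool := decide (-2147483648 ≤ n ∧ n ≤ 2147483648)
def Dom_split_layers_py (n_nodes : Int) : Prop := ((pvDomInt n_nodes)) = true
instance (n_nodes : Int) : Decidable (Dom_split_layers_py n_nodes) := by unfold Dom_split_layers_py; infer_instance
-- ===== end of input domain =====

-- B replaces A's stateful loop (running offset + dead fix-up) by a comprehension over
-- closed-form cut points; same values, same cost (objective: simpler).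

-- ===== PORT A =====
-- loop body of A's for-loop: state = (layers, current)
def pvStepA (base remainder : Int) (st : List (List Int) × Int) (idx : Int) :
    List (List Int) × Int :=
  let size := max 1 (base + (if idx < remainder then 1 else 0))
  (st.1 ++ [PySem.List.pyRange st.2 (st.2 + size) 1], st.2 + size)

def split_layers_py (n_nodes : Int) : List (List Int) :=
  -- 'if n_nodes < 2: raise ValueError' is excluded by Pre_split_layers_py
  let target_layers := max 2 (PySem.Int.floordiv n_nodes 150)
  let layer_count := min (min target_layers 6) n_nodes
  let base := PySem.Int.floordiv n_nodes layer_count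
  let remainder := PySem.Int.mod n_nodes layer_count
  let st := (PySem.List.pyRange 0 layer_count 1).foldl (pvStepA base remainder) ([], 0)
  let layers := st.1
  -- layers[-1][-1] != n_nodes - 1 check + in-place assignment; the 'none' branches are
  -- Python's IndexError, unreachable under Pre_ (layer_count ≥ 2, every layer nonempty)
  match layers.getLast? with
  | none => layers
  | some last =>
    match last.getLast? with
    | none => layers
    | some v =>
      if v ≠ n_nodes - 1 then layers.dropLast ++ [last.dropLast ++ [n_nodes - 1]]
      else layers

-- ===== PORT B =====
def split_layers_py_alt (n_nodes : Int) : List (List Int) :=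
  let layer_count := min (min (max 2 (PySem.Int.floordiv n_nodes 150)) 6) n_nodes
  let base := PySem.Int.floordiv n_nodes layer_count
  let remainder := PySem.Int.mod n_nodes layer_count
  let cut := fun (i : Int) => i * base + min i remainder
  (PySem.List.pyRange 0 layer_count 1).map
    (fun i => PySem.List.pyRange (cut i) (cut (i + 1)) 1)

-- ===== PRECONDITION & SPEC =====
-- A raises ValueError for n_nodes < 2; exactly those inputs are excluded.
def Pre_split_layers_py (n_nodes : Int) : Prop := 2 ≤ n_nodes
instance (n_nodes : Int) : Decidable (Pre_split_layers_py n_nodes) := by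
  unfold Pre_split_layers_py; infer_instance

def pvWitness_split_layers_py : Int := (451)

def Spec_split_layers_py (n_nodes : Int) (out : List (List Int)) : Prop :=
  out = split_layers_py_alt n_nodes
instance (n_nodes : Int) (out : List (List Int)) : Decidable (Spec_split_layers_py n_nodes out) := by
  unfold Spec_split_layers_py; infer_instance

-- ===== CLAIM (what is proved, stated in full; the proofs are below) =====
def Claim_equal_split_layers_py : Prop :=
  ∀ (n_nodes : Int), Dom_split_layers_py n_nodes → Pre_split_layers_py n_nodes →
    Spec_split_layers_py n_nodes (split_layers_py n_nodes)

-- ===== LEMMAS AND PROOFS =====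

-- Invariant of A's loop: starting at offset cut(a), folding over range(a, a+c) appends
-- exactly the closed-form layers of B and ends at offset cut(a+c).
lemma pvFoldA_inv (base r : Int) (hb : 1 ≤ base) :
    ∀ (c : Nat) (a : Int) (P : List (List Int)),
      (PySem.List.pyRange a (a + c) 1).foldl (pvStepA base r) (P, a * base + min a r)
        = (P ++ (PySem.List.pyRange a (a + c) 1).map
            (fun i => PySem.List.pyRange (i * base + min i r) ((i + 1) * base + min (i + 1) r) 1),
           (a + c) * base + min (a + c) r) := by
  intro c
  induction c with
  | zero =>
    intro a P
    rw [PySem.List.pyRange_one_eq_nil (by push_cast; omega)]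
    simp
  | succ m ih =>
    intro a P
    have hcons : PySem.List.pyRange a (a + ((m + 1 : Nat) : Int)) 1
        = a :: PySem.List.pyRange (a + 1) (a + ((m + 1 : Nat) : Int)) 1 :=
      PySem.List.pyRange_one_cons (by push_cast; omega)
    rw [hcons]
    have hsize : max 1 (base + (if a < r then 1 else 0)) = base + (if a < r then 1 else 0) := by
      split_ifs <;> omega
    have hcut : a * base + min a r + (base + (if a < r then 1 else 0))
        = (a + 1) * base + min (a + 1) r := by
      split_ifs with h
      · have h1 : min a r = a := by omega
        have h2 : min (a + 1) r = a + 1 := by omega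
        rw [h1, h2]; ring
      · have h1 : min a r = r := by omega
        have h2 : min (a + 1) r = r := by omega
        rw [h1, h2]; ring
    have hstep : pvStepA base r (P, a * base + min a r) a
        = (P ++ [PySem.List.pyRange (a * base + min a r) ((a + 1) * base + min (a + 1) r) 1],
           (a + 1) * base + min (a + 1) r) := by
      simp only [pvStepA, hsize]
      rw [hcut]
    have hshift : a + ((m + 1 : Nat) : Int) = (a + 1) + (m : Int) := by push_cast; omega
    rw [List.foldl_cons, hstep, hshift, ih (a + 1) _]
    simp [List.map_cons, List.append_assoc]

lemma pvMain (n : Int) (h : 2 ≤ n) : split_layers_py n = split_layers_py_alt n := by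
  simp only [split_layers_py, split_layers_py_alt]
  set k := min (min (max 2 (PySem.Int.floordiv n 150)) 6) n with hk
  have hq : 2 ≤ PySem.Int.floordiv n 150 ∨ PySem.Int.floordiv n 150 < 2 := by omega
  have hk2 : 2 ≤ k := by
    simp only [hk, le_min_iff, le_max_iff]
    refine ⟨⟨Or.inl le_rfl, by omega⟩, h⟩
  have hkn : k ≤ n := min_le_right _ _
  have hkpos : (0:Int) < k := by omega
  set base := PySem.Int.floordiv n k with hbase
  set r := PySem.Int.mod n k with hr
  have hdm : base * k + r = n := PySem.Int.floordiv_mul_add_mod n k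
  have hr0 : 0 ≤ r := PySem.Int.mod_nonneg n hkpos
  have hrk : r < k := PySem.Int.mod_lt n hkpos
  have hb1 : 1 ≤ base := by
    rw [hbase, PySem.Int.le_floordiv_iff_mul_le hkpos]; omega
  -- evaluate the fold via the invariant
  have hfold := pvFoldA_inv base r hb1 k.toNat 0 []
  have h0 : (0:Int) * base + min 0 r = 0 := by
    have : min (0:Int) r = 0 := by omega
    rw [this]; ring
  have hktn : (0:Int) + ((k.toNat : Int)) = k := by omega
  rw [h0, hktn] at hfold
  rw [hfold]
  simp only [List.nil_append]
  -- the fix-up is a no-op: the last layer's last element is already n - 1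
  set g := fun i => PySem.List.pyRange (i * base + min i r) ((i + 1) * base + min (i + 1) r) 1
    with hg
  have hsplit : PySem.List.pyRange 0 k 1
      = PySem.List.pyRange 0 (k - 1) 1 ++ [k - 1] := by
    have := PySem.List.pyRange_one_succ_right (a := 0) (b := k - 1) (by omega)
    simpa using this
  have hlast : ((PySem.List.pyRange 0 k 1).map g).getLast? = some (g (k - 1)) := by
    rw [hsplit, List.map_append]
    simp
  rw [hlast]
  have hcutk : (k - 1 + 1) * base + min (k - 1 + 1) r = n := by
    have : min k r = r := by omega
    have hk1 : k - 1 + 1 = k := by ring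
    rw [hk1, this, mul_comm]; omega
  have hcutk1 : (k - 1) * base + min (k - 1) r ≤ n - 1 := by
    have : min (k - 1) r = r := by omega
    rw [this]; nlinarith [hdm, hb1]
  have hglast : (g (k - 1)).getLast? = some (n - 1) := by
    simp only [hg, hcutk]
    have : PySem.List.pyRange ((k - 1) * base + min (k - 1) r) n 1
        = PySem.List.pyRange ((k - 1) * base + min (k - 1) r) (n - 1) 1 ++ [n - 1] := by
      have := PySem.List.pyRange_one_succ_right
        (a := (k - 1) * base + min (k - 1) r) (b := n - 1) hcutk1
      simpa using this
    rw [this]; simp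
  simp [hglast]

-- ===== VERDICT (by name: the statement is the Claim_ definition above) =====
theorem split_layers_py_spec : Claim_equal_split_layers_py := by
  intro n _ hpre
  unfold Spec_split_layers_py
  exact pvMain n hpre
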